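-- pv_equiv track=rewrite | github.com/pinkyig/INF221-AlgoritmosyComplejidad | Listados/tercerListado/H.py | count
-- ===== SOURCE A (Python) =====
-- def count(i, s, contiene_L=False):
--     # Caso base: hemos procesado toda la cadena
--     if i == len(s):
--         return 1 if contiene_L else 0
--
--     # Si el carácter actual no es '_'
--     if s[i] != 95:
--         # Verificar si hay 3 vocales o consonantes consecutivas
--         if i >= 2 and (all((s[i-2], s[i-1], s[i])) or not any((s[i-2], s[i-1], s[i]))):
--             return 0
--         # Continuar con el siguiente carácter
--         return count(i + 1, s, contiene_L or (s[i] == 2))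
--
--     total_count = 0
--     # Probar con vocal (0), consonante (1) y 'L' (2)
--     for j in [0, 1, 2]:
--         # Determinar el multiplicador basado en el tipo de carácter
--         multiplier = 5 if j == 0 else (1 if j == 2 else 20)
--
--         # Si estamos en los primeros dos caracteres, no hay riesgo de 3 consecutivos
--         if i < 2:
--             original_value = s[i]
--             s[i] = j
--             total_count += multiplier * count(i + 1, s, (j == 2) or contiene_L)
--             s[i] = original_value
--
--         # Verificar si al agregar este carácter se forman 3 consecutivos iguales
--         elif (all((s[i-2], s[i-1], j)) or not any((s[i-2], s[i-1], j))):
--             continue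
--         else:
--             original_value = s[i]
--             s[i] = j
--             total_count += multiplier * count(i + 1, s, (j == 2) or contiene_L)
--             s[i] = original_value
--
--     return total_count
-- ===== SOURCE B (Python) =====
-- def count(i, s, contiene_L=False):
--     # Backward DP over the suffix: two 2x2 tables (indexed by the truthiness of the
--     # previous two effective characters): `tot` = weighted count of all valid fillings
--     # of s[p:], `nol` = those that never use the letter class 2 ('L').
--     n = len(s)
--     tot = ((1, 1), (1, 1))
--     nol = ((1, 1), (1, 1))
--     for p in range(n - 1, i - 1, -1):
--         c = s[p]
--         opts = [(0, 5), (1, 20), (2, 1)] if c == 95 else [(c, 1)]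
--
--         def row(tbl, keep2, a, b):
--             return sum(m * tbl[b][v != 0]
--                        for v, m in opts
--                        if (keep2 or v != 2)
--                        and (p < 2 or not (a == b == (v != 0))))
--
--         tot, nol = (
--             ((row(tot, True, False, False), row(tot, True, False, True)),
--              (row(tot, True, True, False), row(tot, True, True, True))),
--             ((row(nol, False, False, False), row(nol, False, False, True)),
--              (row(nol, False, True, False), row(nol, False, True, True))),
--         )
--     t2 = i >= 2 and s[i - 2] != 0
--     t1 = i >= 1 and s[i - 1] != 0
--     return tot[t2][t1] if contiene_L else tot[t2][t1] - nol[t2][t1]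
-- ===== Notes on version B (the rewrite author's own statement) =====
-- stated objective: alternative
-- what changed: A's 3-way branching recursion with in-place mutation of s is replaced by a backward dynamic program: one sweep over s maintaining two 2x2 tables indexed by the truthiness of the previous two effective characters (all valid fillings / those never using class 2), returning tot or tot-nol depending on contiene_L.
-- outside the precondition, e.g. on count(-1, [0, 95], False): A returns 1, B returns 51
import Mathlib
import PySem

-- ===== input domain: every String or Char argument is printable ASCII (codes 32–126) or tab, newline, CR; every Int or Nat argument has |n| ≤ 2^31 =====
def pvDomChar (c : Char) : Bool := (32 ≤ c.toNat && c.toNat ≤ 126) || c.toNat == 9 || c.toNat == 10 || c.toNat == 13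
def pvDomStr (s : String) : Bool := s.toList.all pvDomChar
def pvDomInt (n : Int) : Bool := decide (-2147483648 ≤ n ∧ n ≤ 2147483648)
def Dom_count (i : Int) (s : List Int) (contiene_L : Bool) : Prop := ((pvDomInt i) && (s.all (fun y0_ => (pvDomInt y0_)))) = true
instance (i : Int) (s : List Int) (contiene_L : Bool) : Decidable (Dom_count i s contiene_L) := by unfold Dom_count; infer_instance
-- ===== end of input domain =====

-- B replaces A's 3-way branching recursion over wildcard choices by a backward dynamic
-- program over two 2x2 tables indexed by the truthiness of the previous two effective
-- characters; A temporarily mutates s but restores it, so the return value is all that matters.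

-- ===== PORT A =====
-- truthiness of a Python int
def pvTruthy (x : Int) : Bool := decide (x ≠ 0)

-- all((a,b,c)) or not any((a,b,c))
def pvTriple (a b c : Int) : Bool :=
  (pvTruthy a && pvTruthy b && pvTruthy c) || (!pvTruthy a && !pvTruthy b && !pvTruthy c)

-- used by count's termination proof
theorem pv_lt_of_pyGet?_some {s : List Int} {i c : Int}
    (h : PySem.List.pyGet? s i = some c) : i < (s.length : Int) := by
  have hin : PySem.Raise.InRange s.length i := by
    by_contra hn
    rw [← PySem.List.pyGet?_eq_none_iff] at hn
    simp [h] at hn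
  simp [PySem.Raise.InRange] at hin
  omega

def count (i : Int) (s : List Int) (contiene_L : Bool) : Int :=
  if i = (s.length : Int) then (if contiene_L then 1 else 0)
  else
    match h : PySem.List.pyGet? s i with
    | none => 0   -- Python raises IndexError here; excluded by Pre_count
    | some c =>
      if c ≠ 95 then
        if 2 ≤ i ∧ pvTriple (PySem.List.pyGetD s (i-2) 0) (PySem.List.pyGetD s (i-1) 0) c = true
        then 0
        else count (i+1) s (contiene_L || decide (c = 2))
      else
        -- for j in [0, 1, 2] (loop unrolled; multipliers 5, 20, 1); s[i] = j is pySetD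
        let b0 : Int :=
          if i < 2 then 5 * count (i+1) (PySem.List.pySetD s i 0) (decide ((0:Int) = 2) || contiene_L)
          else if pvTriple (PySem.List.pyGetD s (i-2) 0) (PySem.List.pyGetD s (i-1) 0) 0 then 0
          else 5 * count (i+1) (PySem.List.pySetD s i 0) (decide ((0:Int) = 2) || contiene_L)
        let b1 : Int :=
          if i < 2 then 20 * count (i+1) (PySem.List.pySetD s i 1) (decide ((1:Int) = 2) || contiene_L)
          else if pvTriple (PySem.List.pyGetD s (i-2) 0) (PySem.List.pyGetD s (i-1) 0) 1 then 0
          else 20 * count (i+1) (PySem.List.pySetD s i 1) (decide ((1:Int) = 2) || contiene_L)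
        let b2 : Int :=
          if i < 2 then 1 * count (i+1) (PySem.List.pySetD s i 2) (decide ((2:Int) = 2) || contiene_L)
          else if pvTriple (PySem.List.pyGetD s (i-2) 0) (PySem.List.pyGetD s (i-1) 0) 2 then 0
          else 1 * count (i+1) (PySem.List.pySetD s i 2) (decide ((2:Int) = 2) || contiene_L)
        0 + b0 + b1 + b2
termination_by (s.length - i).toNat
decreasing_by
  all_goals
    have hlt := pv_lt_of_pyGet?_some h
    simp [PySem.List.length_pySetD]
    omega

-- ===== PORT B =====
-- a 2x2 table tbl[a][b] of Ints
def pvGetT (t : (Int × Int) × (Int × Int)) (a b : Bool) : Int :=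
  if a then (if b then t.2.2 else t.2.1) else (if b then t.1.2 else t.1.1)

-- row(tbl, keep2, a, b): sum over the filtered options
def pvRow (p : Int) (opts : List (Int × Int)) (tbl : (Int × Int) × (Int × Int))
    (keep2 : Bool) (a b : Bool) : Int :=
  opts.foldl (fun acc vm =>
    if (keep2 || !decide (vm.1 = 2))
       && (decide (p < 2) || !(a == b && b == pvTruthy vm.1)) then
      acc + vm.2 * pvGetT tbl b (pvTruthy vm.1)
    else acc) 0

-- one iteration of the loop body: rebuild both tables from position p
def pvStep (s : List Int) (tn : ((Int × Int) × (Int × Int)) × ((Int × Int) × (Int × Int)))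
    (p : Int) : ((Int × Int) × (Int × Int)) × ((Int × Int) × (Int × Int)) :=
  let c := PySem.List.pyGetD s p 0
  let opts : List (Int × Int) := if c = 95 then [(0, 5), (1, 20), (2, 1)] else [(c, 1)]
  (((pvRow p opts tn.1 true false false, pvRow p opts tn.1 true false true),
    (pvRow p opts tn.1 true true false, pvRow p opts tn.1 true true true)),
   ((pvRow p opts tn.2 false false false, pvRow p opts tn.2 false false true),
    (pvRow p opts tn.2 false true false, pvRow p opts tn.2 false true true)))

def count_alt (i : Int) (s : List Int) (contiene_L : Bool) : Int :=
  let n : Int := s.length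
  let res := (PySem.List.pyRange (n-1) (i-1) (-1)).foldl (pvStep s)
      (((1, 1), (1, 1)), ((1, 1), (1, 1)))
  let t2 := decide (2 ≤ i) && pvTruthy (PySem.List.pyGetD s (i-2) 0)
  let t1 := decide (1 ≤ i) && pvTruthy (PySem.List.pyGetD s (i-1) 0)
  if contiene_L then pvGetT res.1 t2 t1 else pvGetT res.1 t2 t1 - pvGetT res.2 t2 t1

-- ===== PRECONDITION & SPEC =====
-- Pre_ keeps i in the natural range 0 ≤ i ≤ len(s): outside it A raises IndexError (i > len(s)
-- or i < -len(s)), or, for -len(s) ≤ i < 0, A's value is an accident of Python's negative-index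
-- wraparound combined with A's in-place mutation of s — a corner no caller of this counting
-- routine would specify either way, and which B does not reproduce.
def Pre_count (i : Int) (s : List Int) (contiene_L : Bool) : Prop := 0 ≤ i ∧ i ≤ (s.length : Int)
instance (i : Int) (s : List Int) (contiene_L : Bool) : Decidable (Pre_count i s contiene_L) := by
  unfold Pre_count; infer_instance
def pvWitness_count : Int × List Int × Bool := (1, [95, 0, 95], false)

def Spec_count (i : Int) (s : List Int) (contiene_L : Bool) (out : Int) : Prop := out = count_alt i s contiene_L
instance (i : Int) (s : List Int) (contiene_L : Bool) (out : Int) : Decidable (Spec_count i s contiene_L out) := by unfold Spec_count; infer_instance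

-- ===== CLAIM (what is proved, stated in full; the proofs are below) =====
def Claim_equal_count : Prop := ∀ (i : Int) (s : List Int) (contiene_L : Bool), Dom_count i s contiene_L → Pre_count i s contiene_L → Spec_count i s contiene_L (count i s contiene_L)

-- ===== LEMMAS AND PROOFS =====

-- the loop state after the iterations for positions n-1 … i (i.e. the tables for suffix s[i:])
def pvTabs (s : List Int) (i : Int) :
    ((Int × Int) × (Int × Int)) × ((Int × Int) × (Int × Int)) :=
  (PySem.List.pyRange ((s.length : Int) - 1) (i-1) (-1)).foldl (pvStep s)
    (((1, 1), (1, 1)), ((1, 1), (1, 1)))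

def pvT2 (s : List Int) (i : Int) : Bool := decide (2 ≤ i) && pvTruthy (PySem.List.pyGetD s (i-2) 0)
def pvT1 (s : List Int) (i : Int) : Bool := decide (1 ≤ i) && pvTruthy (PySem.List.pyGetD s (i-1) 0)

theorem pvTabs_stop (s : List Int) (i : Int) (h : (s.length : Int) ≤ i) :
    pvTabs s i = (((1, 1), (1, 1)), ((1, 1), (1, 1))) := by
  unfold pvTabs
  rw [PySem.List.pyRange_neg_one_eq_nil (by omega)]
  rfl

theorem pvRange_snoc (n i : Int) (h : i < n) :
    PySem.List.pyRange (n-1) (i-1) (-1) = PySem.List.pyRange (n-1) i (-1) ++ [i] := by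
  rw [PySem.List.pyRange_neg_one_eq_reverse (n-1) (i-1),
      PySem.List.pyRange_neg_one_eq_reverse (n-1) i]
  have e1 : i - 1 + 1 = i := by ring
  have e2 : n - 1 + 1 = n := by ring
  rw [e1, e2, PySem.List.pyRange_one_cons (by omega), List.reverse_cons]

theorem pvTabs_step (s : List Int) (i : Int) (h : i < (s.length : Int)) :
    pvTabs s i = pvStep s (pvTabs s (i+1)) i := by
  unfold pvTabs
  rw [pvRange_snoc _ _ h, List.foldl_append]
  have e : i + 1 - 1 = i := by ring
  rw [e]
  rfl

theorem pySetD_nonneg (s : List Int) (i j : Int) (h0 : 0 ≤ i) (h1 : i < (s.length:Int)) :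
    PySem.List.pySetD s i j = s.set i.toNat j := by
  simp [PySem.List.pySetD, PySem.List.pySet?, PySem.List.pyIdx?, h0, h1]

theorem pvGetD_set_ne (s : List Int) (i j p : Int) (h0 : 0 ≤ i) (h1 : i < (s.length:Int))
    (hp0 : 0 ≤ p) (hp1 : p < (s.length:Int)) (hne : p ≠ i) :
    PySem.List.pyGetD (PySem.List.pySetD s i j) p 0 = PySem.List.pyGetD s p 0 := by
  rw [pySetD_nonneg s i j h0 h1,
      PySem.List.pyGetD_eq_getElem (s.set i.toNat j) 0 hp0 (by simpa using hp1),
      PySem.List.pyGetD_eq_getElem s 0 hp0 hp1,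
      List.getElem_set_ne (by omega)]

theorem pvGetD_set_self (s : List Int) (i j : Int) (h0 : 0 ≤ i) (h1 : i < (s.length:Int)) :
    PySem.List.pyGetD (PySem.List.pySetD s i j) i 0 = j := by
  have hn : i.toNat < s.length := by omega
  rw [pySetD_nonneg s i j h0 h1,
      PySem.List.pyGetD_eq_getElem (s.set i.toNat j) 0 h0 (by simpa using h1),
      List.getElem_set_self (by simpa using hn)]

theorem pvTabs_set (s : List Int) (i j : Int) (h0 : 0 ≤ i) (h1 : i < (s.length : Int)) :
    pvTabs (PySem.List.pySetD s i j) (i+1) = pvTabs s (i+1) := by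
  unfold pvTabs
  rw [PySem.List.length_pySetD]
  apply PySem.List.foldl_congr_mem
  intro acc p hp
  rw [PySem.List.mem_pyRange_neg_one] at hp
  unfold pvStep
  rw [pvGetD_set_ne s i j p h0 h1 (by omega) (by omega) (by omega)]

theorem pvGetT_step_fst (s : List Int)
    (tn : ((Int × Int) × (Int × Int)) × ((Int × Int) × (Int × Int))) (p : Int) (a b : Bool) :
    pvGetT (pvStep s tn p).1 a b =
      pvRow p (if PySem.List.pyGetD s p 0 = 95 then [(0, 5), (1, 20), (2, 1)]
               else [(PySem.List.pyGetD s p 0, 1)]) tn.1 true a b := by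
  cases a <;> cases b <;> rfl

theorem pvGetT_step_snd (s : List Int)
    (tn : ((Int × Int) × (Int × Int)) × ((Int × Int) × (Int × Int))) (p : Int) (a b : Bool) :
    pvGetT (pvStep s tn p).2 a b =
      pvRow p (if PySem.List.pyGetD s p 0 = 95 then [(0, 5), (1, 20), (2, 1)]
               else [(PySem.List.pyGetD s p 0, 1)]) tn.2 false a b := by
  cases a <;> cases b <;> rfl

theorem pvT2_succ (s : List Int) (i : Int) : pvT2 s (i+1) = pvT1 s i := by
  unfold pvT2 pvT1
  have e : i + 1 - 2 = i - 1 := by ring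
  rw [e]
  congr 1
  rw [decide_eq_decide]
  omega

theorem pvT1_succ (s : List Int) (i : Int) (h0 : 0 ≤ i) :
    pvT1 s (i+1) = pvTruthy (PySem.List.pyGetD s i 0) := by
  unfold pvT1
  have e : i + 1 - 1 = i := by ring
  rw [e]
  simp [show (1:Int) ≤ i + 1 by omega]

theorem pvT2_set (s : List Int) (i j : Int) (h0 : 0 ≤ i) (h1 : i < (s.length : Int)) :
    pvT2 (PySem.List.pySetD s i j) (i+1) = pvT1 s i := by
  rw [pvT2_succ]
  unfold pvT1
  by_cases hi : (1:Int) ≤ i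
  · rw [pvGetD_set_ne s i j (i-1) h0 h1 (by omega) (by omega) (by omega)]
  · simp [hi]

theorem pvT1_set (s : List Int) (i j : Int) (h0 : 0 ≤ i) (h1 : i < (s.length : Int)) :
    pvT1 (PySem.List.pySetD s i j) (i+1) = pvTruthy j := by
  rw [pvT1_succ _ _ h0, pvGetD_set_self s i j h0 h1]

theorem pvMain : ∀ (k : Nat) (i : Int) (s : List Int) (L : Bool), 0 ≤ i → i + k = (s.length : Int) →
    count i s L =
      (if L then pvGetT (pvTabs s i).1 (pvT2 s i) (pvT1 s i)
       else pvGetT (pvTabs s i).1 (pvT2 s i) (pvT1 s i)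
            - pvGetT (pvTabs s i).2 (pvT2 s i) (pvT1 s i)) := by
  intro k
  induction k with
  | zero =>
    intro i s L h0 hk
    have hi : i = (s.length : Int) := by push_cast at hk; omega
    rw [count, if_pos hi, pvTabs_stop s i (le_of_eq hi.symm)]
    cases L <;> simp [pvGetT]
  | succ k ih =>
    intro i s L h0 hk
    have hlt : i < (s.length : Int) := by push_cast at hk; omega
    have hsome := PySem.List.pyGet?_eq_some_getElem (xs := s) h0 hlt
    have hk' : (i + 1) + (k : Int) = (s.length : Int) := by push_cast at hk ⊢; omega
    rw [count, if_neg (by omega)]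
    split
    · next heq => rw [hsome] at heq; exact absurd heq (by simp)
    · next c heq =>
      have hgd : PySem.List.pyGetD s i 0 = c := by
        rw [PySem.List.pyGetD_eq_getElem s 0 h0 hlt]
        rw [hsome] at heq
        exact (Option.some.inj heq)
      rw [pvTabs_step s i hlt, pvGetT_step_fst, pvGetT_step_snd, hgd]
      by_cases h95 : c = 95
      · subst h95
        rw [if_neg (by simp)]
        rw [ih (i+1) (PySem.List.pySetD s i 0) (decide ((0:Int)=2) || L) (by omega)
              (by rw [PySem.List.length_pySetD]; omega),
            ih (i+1) (PySem.List.pySetD s i 1) (decide ((1:Int)=2) || L) (by omega)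
              (by rw [PySem.List.length_pySetD]; omega),
            ih (i+1) (PySem.List.pySetD s i 2) (decide ((2:Int)=2) || L) (by omega)
              (by rw [PySem.List.length_pySetD]; omega),
            pvTabs_set s i 0 h0 hlt, pvTabs_set s i 1 h0 hlt, pvTabs_set s i 2 h0 hlt,
            pvT2_set s i 0 h0 hlt, pvT2_set s i 1 h0 hlt, pvT2_set s i 2 h0 hlt,
            pvT1_set s i 0 h0 hlt, pvT1_set s i 1 h0 hlt, pvT1_set s i 2 h0 hlt]
        simp only [pvTriple]
        by_cases h2 : 2 ≤ i
        · cases L <;>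
            by_cases hx : PySem.List.pyGetD s (i-2) 0 = 0 <;>
            by_cases hy : PySem.List.pyGetD s (i-1) 0 = 0 <;>
            simp [pvRow, pvGetT, pvTruthy, pvT2, pvT1, hx, hy, h2,
                  show ¬ (i < 2) by omega, show (1:Int) ≤ i by omega] <;> ring
        · by_cases h1i : (1:Int) ≤ i
          · cases L <;>
              by_cases hy : PySem.List.pyGetD s (i-1) 0 = 0 <;>
              simp [pvRow, pvGetT, pvTruthy, pvT2, pvT1, hy, h1i,
                    show i < 2 by omega, show ¬ (2:Int) ≤ i by omega] <;> ring
          · cases L <;>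
              simp [pvRow, pvGetT, pvTruthy, pvT2, pvT1,
                    show i < 2 by omega, show ¬ (2:Int) ≤ i by omega,
                    show ¬ (1:Int) ≤ i by omega] <;> ring
      · rw [if_pos h95]
        rw [ih (i+1) s (L || decide (c=2)) (by omega) (by omega),
            pvT2_succ, pvT1_succ _ _ h0, hgd]
        simp only [pvTriple, if_neg h95]
        by_cases h2 : 2 ≤ i
        · cases L <;>
            by_cases hc2 : c = 2 <;>
            by_cases hc0 : c = 0 <;>
            by_cases hx : PySem.List.pyGetD s (i-2) 0 = 0 <;>
            by_cases hy : PySem.List.pyGetD s (i-1) 0 = 0 <;>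
            simp [pvRow, pvGetT, pvTruthy, pvT2, pvT1, hx, hy, h2, hc2, hc0,
                  show ¬ (i < 2) by omega, show (1:Int) ≤ i by omega]
        · by_cases h1i : (1:Int) ≤ i
          · cases L <;>
              by_cases hc2 : c = 2 <;>
              by_cases hc0 : c = 0 <;>
              by_cases hy : PySem.List.pyGetD s (i-1) 0 = 0 <;>
              simp [pvRow, pvGetT, pvTruthy, pvT2, pvT1, hy, h1i, hc2, hc0,
                    show i < 2 by omega, show ¬ (2:Int) ≤ i by omega]
          · cases L <;>
              by_cases hc2 : c = 2 <;>
              by_cases hc0 : c = 0 <;>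
              simp [pvRow, pvGetT, pvTruthy, pvT2, pvT1, hc2, hc0,
                    show i < 2 by omega, show ¬ (2:Int) ≤ i by omega,
                    show ¬ (1:Int) ≤ i by omega]

-- ===== VERDICT (by name: the statement is the Claim_ definition above) =====
theorem count_spec : Claim_equal_count := by
  intro i s L _ hpre
  obtain ⟨h0, h1⟩ := hpre
  unfold Spec_count count_alt
  have hk : i + ((s.length : Int) - i).toNat = (s.length : Int) := by omega
  simpa [pvTabs, pvT2, pvT1] using pvMain ((s.length : Int) - i).toNat i s L h0 hk
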